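-- pv_equiv track=rewrite | github.com/KatKidnapper/group-generator | group-gen.py | form_groups_fixed_size
-- ===== SOURCE A (Python) =====
-- from itertools import combinations
--
-- def form_groups_fixed_size(student_names, interactions, group_size):
--     groups = []
--     students_combinations = combinations(student_names, group_size)
--
--     for combo in students_combinations:
--         valid_group = True
--         for pair in combinations(combo, 2):
--             try:
--                 if pair[1] in interactions[pair[0]] or pair[0] in interactions[pair[1]]:
--                     valid_group = False
--                     break
--             except:pass
--         if valid_group:
--             groups.append(combo)
--
--     return groups
-- ===== SOURCE B (Python) =====
-- def form_groups_fixed_size(student_names, interactions, group_size):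
--     # Recursive backtracking: build each group by choosing students in index
--     # order, checking a new candidate only against the members already chosen,
--     # so invalid branches are pruned instead of enumerating every combination.
--     def conflict(x, y):
--         try:
--             return y in interactions[x] or x in interactions[y]
--         except:
--             return False
--
--     groups = []
--     chosen = []
--
--     def extend(start):
--         if len(chosen) == group_size:
--             groups.append(tuple(chosen))
--             return
--         for i in range(start, len(student_names)):
--             s = student_names[i]
--             if all(not conflict(c, s) for c in chosen):
--                 chosen.append(s)
--                 extend(i + 1)
--                 chosen.pop()
--
--     extend(0)
--     return groups
-- ===== Notes on version B (the rewrite author's own statement) =====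
-- stated objective: alternative
-- what changed: B replaces enumerate-all-combinations-then-test with recursive backtracking that extends a partial group one student at a time, checking each candidate only against already-chosen members and pruning conflicting branches before they are expanded.
import Mathlib
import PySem

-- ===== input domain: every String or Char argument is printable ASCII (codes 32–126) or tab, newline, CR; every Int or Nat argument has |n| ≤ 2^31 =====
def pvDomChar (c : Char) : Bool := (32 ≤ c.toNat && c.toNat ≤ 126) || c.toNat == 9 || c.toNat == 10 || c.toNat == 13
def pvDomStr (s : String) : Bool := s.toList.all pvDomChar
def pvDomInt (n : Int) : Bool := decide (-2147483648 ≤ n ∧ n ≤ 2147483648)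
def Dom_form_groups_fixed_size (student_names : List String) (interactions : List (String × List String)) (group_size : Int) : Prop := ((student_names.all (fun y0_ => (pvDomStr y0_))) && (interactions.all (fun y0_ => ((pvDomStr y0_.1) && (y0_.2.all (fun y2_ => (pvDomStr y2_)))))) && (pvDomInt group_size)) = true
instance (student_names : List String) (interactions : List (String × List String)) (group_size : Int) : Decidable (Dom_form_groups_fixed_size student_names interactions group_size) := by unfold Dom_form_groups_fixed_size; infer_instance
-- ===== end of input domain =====

-- B replaces enumerate-all-combinations-then-test with recursive backtracking that extends a
-- partial group one student at a time, pruning conflicting branches (objective: alternative).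


-- the predicate 'pair[1] in interactions[pair[0]] or pair[0] in interactions[pair[1]]',
-- left-to-right with short-circuit; a KeyError (lookup = none) is swallowed by the bare
-- 'except' (A: 'except: pass'; B: 'except: return False'), i.e. yields false.
-- (dict → assoc list, lookup = first match.)  Shared by both ports, as both Pythons
-- contain this same predicate.
def pvConflict (interactions : List (String × List String)) (x y : String) : Bool :=
  match interactions.lookup x with
  | none => false
  | some lx =>
    if y ∈ lx then true
    else
      match interactions.lookup y with
      | none => false
      | some ly => decide (x ∈ ly)

-- ===== PORT A =====
-- itertools.combinations(l, n): all length-n subsequences, in itertools' order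
def pvComb {α : Type} : Nat → List α → List (List α)
  | 0, _ => [[]]
  | _ + 1, [] => []
  | n + 1, x :: xs => ((pvComb n xs).map (fun c => x :: c)) ++ pvComb (n + 1) xs

-- the inner 'for pair in combinations(combo, 2): … break' loop computing valid_group
def pvCheckPairs (interactions : List (String × List String)) : List (List String) → Bool
  | [] => true
  | p :: ps =>
    match p with
    | x :: y :: _ => if pvConflict interactions x y then false else pvCheckPairs interactions ps
    | _ => pvCheckPairs interactions ps

def form_groups_fixed_size (student_names : List String) (interactions : List (String × List String)) (group_size : Int) : List (List String) :=
  (pvComb group_size.toNat student_names).foldl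
    (fun groups combo =>
      if pvCheckPairs interactions (pvComb 2 combo) then groups ++ [combo] else groups)
    []

-- ===== PORT B =====
-- B's 'extend(start)': the for-loop over range(start, n) becomes recursion over the suffix
-- of student_names from index start; 'chosen' is the shared partial group (appended / popped
-- around the recursive call in Python = passed extended into the first branch here).
def pvExtend (interactions : List (String × List String)) (k : Nat) :
    List String → List String → List (List String)
  | rest, chosen =>
    if chosen.length = k then [chosen]
    else
      match rest with
      | [] => []
      | s :: rs =>
        (if chosen.all (fun c => !(pvConflict interactions c s)) then
            pvExtend interactions k rs (chosen ++ [s])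
          else [])
        ++ pvExtend interactions k rs chosen
  termination_by rest _ => rest.length

def form_groups_fixed_size_alt (student_names : List String) (interactions : List (String × List String)) (group_size : Int) : List (List String) :=
  pvExtend interactions group_size.toNat student_names []

-- ===== PRECONDITION & SPEC =====
-- Pre_ excludes only group_size < 0, where Python's combinations(…, group_size) raises
-- ValueError in A; A returns no value there.
def Pre_form_groups_fixed_size (_student_names : List String) (_interactions : List (String × List String)) (group_size : Int) : Prop := 0 ≤ group_size
instance (student_names : List String) (interactions : List (String × List String)) (group_size : Int) : Decidable (Pre_form_groups_fixed_size student_names interactions group_size) := by unfold Pre_form_groups_fixed_size; infer_instance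
def pvWitness_form_groups_fixed_size : List String × (List (String × List String)) × Int :=
  (["ann", "bob", "cat"], [("ann", ["bob"])], 2)

def Spec_form_groups_fixed_size (student_names : List String) (interactions : List (String × List String)) (group_size : Int) (out : List (List String)) : Prop := out = form_groups_fixed_size_alt student_names interactions group_size
instance (student_names : List String) (interactions : List (String × List String)) (group_size : Int) (out : List (List String)) : Decidable (Spec_form_groups_fixed_size student_names interactions group_size out) := by unfold Spec_form_groups_fixed_size; infer_instance

-- ===== CLAIM (what is proved, stated in full; the proofs are below) =====
def Claim_equal_form_groups_fixed_size : Prop := ∀ (student_names : List String) (interactions : List (String × List String)) (group_size : Int), Dom_form_groups_fixed_size student_names interactions group_size → Pre_form_groups_fixed_size student_names interactions group_size → Spec_form_groups_fixed_size student_names interactions group_size (form_groups_fixed_size student_names interactions group_size)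

-- ===== LEMMAS AND PROOFS =====

-- 'valid_group has no conflicting internal pair', as a predicate on a combo
def pvAllPairs (interactions : List (String × List String)) (l : List String) : Bool :=
  (pvComb 2 l).all (fun p =>
    match p with
    | x :: y :: _ => !(pvConflict interactions x y)
    | _ => true)

-- 'extending chosen by the elements of l, each step passes the chosen-so-far check'
def pvOkFrom (interactions : List (String × List String)) :
    List String → List String → Bool
  | _, [] => true
  | chosen, s :: t =>
    (chosen.all (fun c => !(pvConflict interactions c s))) && pvOkFrom interactions (chosen ++ [s]) t

theorem pvComb_one {α : Type} (l : List α) : pvComb 1 l = l.map (fun x => [x]) := by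
  induction l with
  | nil => rfl
  | cons x xs ih => simp [pvComb, ih]

theorem pvAllPairs_cons (interactions : List (String × List String)) (s : String) (t : List String) :
    pvAllPairs interactions (s :: t)
      = (t.all (fun u => !(pvConflict interactions s u)) && pvAllPairs interactions t) := by
  simp only [pvAllPairs, pvComb, pvComb_one, List.all_append, List.all_map]
  rfl

theorem pvOkFrom_eq (interactions : List (String × List String)) (l chosen : List String) :
    pvOkFrom interactions chosen l
      = (l.all (fun s => chosen.all (fun c => !(pvConflict interactions c s)))
          && pvAllPairs interactions l) := by
  induction l generalizing chosen with
  | nil => simp [pvOkFrom, pvAllPairs, pvComb]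
  | cons s t ih =>
    rw [pvOkFrom, ih, pvAllPairs_cons]
    rw [Bool.eq_iff_iff]
    simp only [Bool.and_eq_true, List.all_eq_true, List.all_append, List.all_cons,
      List.all_nil, and_true]
    constructor
    · rintro ⟨h1, h2, h3⟩
      exact ⟨⟨h1, fun u hu => (h2 u hu).1⟩, fun u hu => (h2 u hu).2, h3⟩
    · rintro ⟨⟨h1, h2⟩, h3, h4⟩
      exact ⟨h1, fun u hu => ⟨h2 u hu, h3 u hu⟩, h4⟩

-- A's break-loop over the pairs of a combo equals the all-quantification
theorem pvCheckPairs_eq_all (interactions : List (String × List String)) (ps : List (List String)) :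
    pvCheckPairs interactions ps =
      ps.all (fun p =>
        match p with
        | x :: y :: _ => !(pvConflict interactions x y)
        | _ => true) := by
  induction ps with
  | nil => rfl
  | cons p ps ih =>
    match p with
    | [] => simpa [pvCheckPairs] using ih
    | [a] => simpa [pvCheckPairs] using ih
    | a :: b :: r =>
      by_cases hc : pvConflict interactions a b = true <;>
        simp [pvCheckPairs, hc, ih]

-- B's backtracking search, characterised as filter-then-prepend over the combinations
theorem pvExtend_eq (interactions : List (String × List String)) (k : Nat)
    (rest : List String) :
    ∀ chosen : List String, chosen.length ≤ k →
      pvExtend interactions k rest chosen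
        = ((pvComb (k - chosen.length) rest).filter (pvOkFrom interactions chosen)).map
            (fun c => chosen ++ c) := by
  induction rest with
  | nil =>
    intro chosen hle
    rw [pvExtend]
    by_cases h : chosen.length = k
    · simp [h, pvComb, pvOkFrom]
    · have : ∃ m, k - chosen.length = m + 1 := ⟨k - chosen.length - 1, by omega⟩
      obtain ⟨m, hm⟩ := this
      simp [h, hm, pvComb]
  | cons s rs ih =>
    intro chosen hle
    rw [pvExtend]
    by_cases h : chosen.length = k
    · simp [h, pvComb, pvOkFrom]
    · have hm : ∃ m, k - chosen.length = m + 1 := ⟨k - chosen.length - 1, by omega⟩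
      obtain ⟨m, hm⟩ := hm
      have hlen' : (chosen ++ [s]).length ≤ k := by simp; omega
      have hm' : k - (chosen ++ [s]).length = m := by simp; omega
      simp only [h, if_false, hm, pvComb, List.filter_append, List.map_append]
      congr 1
      · by_cases hok : chosen.all (fun c => !(pvConflict interactions c s)) = true
        · rw [if_pos hok, ih (chosen ++ [s]) hlen', hm', List.filter_map, List.map_map]
          have hfil : (pvComb m rs).filter (pvOkFrom interactions chosen ∘ fun c => s :: c)
              = (pvComb m rs).filter (pvOkFrom interactions (chosen ++ [s])) := by
            apply List.filter_congr
            intro c _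
            simp [Function.comp, pvOkFrom, hok]
          rw [hfil]
          apply List.map_congr_left
          intro c _
          simp
        · rw [if_neg hok, List.filter_map]
          have hnil : (pvComb m rs).filter (pvOkFrom interactions chosen ∘ fun c => s :: c) = [] := by
            apply List.filter_eq_nil_iff.mpr
            intro c _
            simp [Function.comp, pvOkFrom, hok]
          rw [hnil]
          rfl
      · rw [ih chosen hle, hm]

-- ===== VERDICT (by name: the statement is the Claim_ definition above) =====
theorem form_groups_fixed_size_spec : Claim_equal_form_groups_fixed_size := by
  intro names interactions k _ _
  unfold Spec_form_groups_fixed_size form_groups_fixed_size form_groups_fixed_size_alt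
  rw [PySem.List.foldl_append_if_eq_filter]
  rw [pvExtend_eq interactions k.toNat names [] (by simp)]
  simp only [List.nil_append, List.map_id']
  congr 1
  funext combo
  rw [pvCheckPairs_eq_all]
  rw [pvOkFrom_eq]
  simp [pvAllPairs]
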